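-- pv_equiv track=rewrite | github.com/mg-open-apprentice/classic-traveller-character-generator-1985 | character_generation_rules.py | get_characteristic_quality_class
-- ===== SOURCE A (Python) =====
-- from typing import Any, List, Tuple, Optional
--
-- def get_characteristic_quality_thresholds() -> dict[str, Any]:
--     """
--     Get characteristic quality thresholds and corresponding CSS classes
--
--     Returns:
--         Dictionary with thresholds and CSS class mappings
--     """
--     return {
--         "thresholds": [
--             {"min": 11, "max": 15, "class": "char-excellent", "label": "Excellent"},
--             {"min": 9, "max": 10, "class": "char-good", "label": "Good"},
--             {"min": 6, "max": 8, "class": "char-average", "label": "Average"},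
--             {"min": 3, "max": 5, "class": "char-poor", "label": "Poor"},
--             {"min": 0, "max": 2, "class": "char-bad", "label": "Bad"}
--         ],
--         "default_class": "char-average",
--         "all_classes": ["char-bad", "char-poor", "char-average", "char-good", "char-excellent"]
--     }
--
-- def get_characteristic_quality_class(value: int) -> str:
--     """
--     Get the CSS class for a characteristic value
--
--     Args:
--         value: The characteristic value (0-15)
--
--     Returns:
--         CSS class name for the value
--     """
--     thresholds = get_characteristic_quality_thresholds()["thresholds"]
--
--     for threshold in thresholds:
--         if threshold["min"] <= value <= threshold["max"]:
--             return threshold["class"]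
--
--     # Fallback for values outside normal range
--     if value >= 15:
--         return "char-excellent"
--     else:
--         return "char-bad"
-- ===== SOURCE B (Python) =====
-- def get_characteristic_quality_class(value: int) -> str:
--     if value >= 11:
--         return "char-excellent"
--     elif value >= 9:
--         return "char-good"
--     elif value >= 6:
--         return "char-average"
--     elif value >= 3:
--         return "char-poor"
--     else:
--         return "char-bad"
-- ===== Notes on version B (the rewrite author's own statement) =====
-- stated objective: simpler
-- what changed: Replaced the threshold table plus linear scan and post-loop fallback with a direct comparison cascade on lower bounds only.
import Mathlib
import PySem

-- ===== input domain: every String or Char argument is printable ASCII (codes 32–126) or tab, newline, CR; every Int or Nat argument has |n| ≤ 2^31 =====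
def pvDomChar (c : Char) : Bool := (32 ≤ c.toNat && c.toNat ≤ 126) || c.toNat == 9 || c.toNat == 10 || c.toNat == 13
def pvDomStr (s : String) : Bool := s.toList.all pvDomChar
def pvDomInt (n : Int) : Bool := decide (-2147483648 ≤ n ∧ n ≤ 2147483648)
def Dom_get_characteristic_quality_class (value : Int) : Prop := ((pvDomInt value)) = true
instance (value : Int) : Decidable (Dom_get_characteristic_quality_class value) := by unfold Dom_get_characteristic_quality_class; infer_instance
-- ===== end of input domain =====

-- B replaces A's threshold table and linear scan (with its post-loop fallback) by a plain comparison cascade; objective: simpler.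

-- ===== PORT A =====
-- the "thresholds" list of get_characteristic_quality_thresholds, as (min, max, class) records
def pvThresholds : List (Int × Int × String) :=
  [(11, 15, "char-excellent"), (9, 10, "char-good"), (6, 8, "char-average"),
   (3, 5, "char-poor"), (0, 2, "char-bad")]

-- the for-loop: return the class of the first threshold whose range contains value
def pvScan (value : Int) : List (Int × Int × String) → Option String
  | [] => none
  | (lo, hi, cls) :: rest =>
      if lo ≤ value ∧ value ≤ hi then some cls else pvScan value rest

def get_characteristic_quality_class (value : Int) : String :=
  match pvScan value pvThresholds with
  | some cls => cls
  | none => if value ≥ 15 then "char-excellent" else "char-bad"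

-- ===== PORT B =====
def get_characteristic_quality_class_alt (value : Int) : String :=
  if value ≥ 11 then "char-excellent"
  else if value ≥ 9 then "char-good"
  else if value ≥ 6 then "char-average"
  else if value ≥ 3 then "char-poor"
  else "char-bad"

-- ===== PRECONDITION & SPEC =====
def Spec_get_characteristic_quality_class (value : Int) (out : String) : Prop := out = get_characteristic_quality_class_alt value
instance (value : Int) (out : String) : Decidable (Spec_get_characteristic_quality_class value out) := by unfold Spec_get_characteristic_quality_class; infer_instance

-- ===== CLAIM (what is proved, stated in full; the proofs are below) =====
def Claim_equal_get_characteristic_quality_class : Prop := ∀ (value : Int), Dom_get_characteristic_quality_class value → Spec_get_characteristic_quality_class value (get_characteristic_quality_class value)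

-- ===== LEMMAS AND PROOFS =====

-- ===== VERDICT (by name: the statement is the Claim_ definition above) =====
theorem get_characteristic_quality_class_spec : Claim_equal_get_characteristic_quality_class := by
  intro value _
  unfold Spec_get_characteristic_quality_class get_characteristic_quality_class
    get_characteristic_quality_class_alt pvThresholds
  simp only [pvScan]
  split_ifs <;> simp_all <;> omega
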